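-- pv_equiv track=rewrite | github.com/COLA-Laboratory/GraphFLA | graphfla/neighbors.py | protein_neighbor_generator
-- ===== SOURCE A (Python) =====
-- from itertools import combinations, product
--
-- def protein_neighbor_generator(config, config_dict, n_edit=1):
--     amino_acids = [
--         "A",
--         "R",
--         "N",
--         "D",
--         "C",
--         "Q",
--         "E",
--         "G",
--         "H",
--         "I",
--         "L",
--         "K",
--         "M",
--         "F",
--         "P",
--         "S",
--         "T",
--         "W",
--         "Y",
--         "V",
--     ]
--
--     def get_neighbors(index, value):
--         return [aa for aa in amino_acids if aa != value]
--
--     def k_edit_combinations():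
--         for indices in combinations(range(len(config)), n_edit):
--             current = list(config)
--             possible_values = [get_neighbors(i, current[i]) for i in indices]
--             for changes in product(*possible_values):
--                 neighbor = list(current)
--                 for idx, new_val in zip(indices, changes):
--                     neighbor[idx] = new_val
--                 yield tuple(neighbor)
--
--     return list(k_edit_combinations())
-- ===== SOURCE B (Python) =====
-- def protein_neighbor_generator(config, config_dict, n_edit=1):
--     AMINO = ["A", "R", "N", "D", "C", "Q", "E", "G", "H", "I",
--              "L", "K", "M", "F", "P", "S", "T", "W", "Y", "V"]
--     base = list(config)
--     n = len(base)
--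
--     # index combinations in lexicographic order, built recursively
--     def combos(k, start):
--         if k == 0:
--             yield []
--         else:
--             for i in range(start, n - k + 1):
--                 for rest in combos(k - 1, i + 1):
--                     yield [i] + rest
--
--     # substitutions for one index set, first index varying slowest
--     def expand(indices):
--         if not indices:
--             yield tuple(base)
--             return
--         i, rest = indices[0], indices[1:]
--         for aa in AMINO:
--             if aa != base[i]:
--                 for tail in expand(rest):
--                     out = list(tail)
--                     out[i] = aa
--                     yield tuple(out)
--
--     return [nb for idx in combos(n_edit, 0) for nb in expand(idx)]
-- ===== Notes on version B (the rewrite author's own statement) =====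
-- stated objective: alternative
-- what changed: Replaced itertools.combinations+product with a pair of hand-written recursive generators: one enumerates index combinations lexicographically carrying a start position, the other expands substitutions per index set recursively with the first edited position varying slowest.
import Mathlib
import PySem

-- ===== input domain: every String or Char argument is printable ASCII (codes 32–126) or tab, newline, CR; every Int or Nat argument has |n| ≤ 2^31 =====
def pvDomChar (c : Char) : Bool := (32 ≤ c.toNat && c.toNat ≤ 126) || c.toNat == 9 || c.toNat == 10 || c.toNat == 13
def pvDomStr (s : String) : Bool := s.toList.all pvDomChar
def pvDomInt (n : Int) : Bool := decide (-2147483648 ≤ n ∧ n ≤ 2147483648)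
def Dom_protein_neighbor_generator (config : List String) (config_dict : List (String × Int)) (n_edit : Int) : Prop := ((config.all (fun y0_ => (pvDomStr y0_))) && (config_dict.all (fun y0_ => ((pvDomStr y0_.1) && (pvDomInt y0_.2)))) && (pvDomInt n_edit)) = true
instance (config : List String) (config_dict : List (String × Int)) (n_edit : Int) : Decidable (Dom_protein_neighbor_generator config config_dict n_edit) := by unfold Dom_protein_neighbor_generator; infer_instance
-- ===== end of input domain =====

-- B replaces itertools.combinations+product with one pair of recursive generators
-- (index combinations, then a recursive substitution expansion); objective: alternative decomposition.

-- ===== PORT A =====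
-- amino_acids list defined inside A
def pvAminoA : List String :=
  ["A", "R", "N", "D", "C", "Q", "E", "G", "H", "I",
   "L", "K", "M", "F", "P", "S", "T", "W", "Y", "V"]

-- transliteration of itertools.combinations over a list (lexicographic order)
def pvCombsA : List Nat → Nat → List (List Nat)
  | _, 0 => [[]]
  | [], _ + 1 => []
  | x :: xs, k + 1 => ((pvCombsA xs k).map (x :: ·)) ++ pvCombsA xs (k + 1)

-- transliteration of itertools.product (first factor varies slowest)
def pvProdA : List (List String) → List (List String)
  | [] => [[]]
  | l :: rest => l.flatMap (fun x => (pvProdA rest).map (x :: ·))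

-- the `for idx, new_val in zip(indices, changes): neighbor[idx] = new_val` loop
def pvApplyA (cur : List String) (ps : List (Nat × String)) : List String :=
  ps.foldl (fun acc p => acc.set p.1 p.2) cur

-- port of A; current[i] via getD: indices come from combinations(range(len(config))) so always in range
def protein_neighbor_generator (config : List String) (config_dict : List (String × Int)) (n_edit : Int) : List (List String) :=
  (pvCombsA (List.range config.length) n_edit.toNat).flatMap (fun indices =>
    let current := config
    let possible := indices.map (fun i => pvAminoA.filter (fun aa => aa ≠ current.getD i ""))
    (pvProdA possible).map (fun changes => pvApplyA current (indices.zip changes)))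

-- ===== PORT B =====
def pvAminoB : List String :=
  ["A", "R", "N", "D", "C", "Q", "E", "G", "H", "I",
   "L", "K", "M", "F", "P", "S", "T", "W", "Y", "V"]

-- Source B's combos(k, start): range(start, n - k + 1) with k edits left → range' start (n - (k-1) - start)
def pvCombosB (n : Nat) : Nat → Nat → List (List Nat)
  | 0, _ => [[]]
  | k + 1, start =>
    (List.range' start (n - k - start)).flatMap
      (fun i => (pvCombosB n k (i + 1)).map (i :: ·))

-- Source B's expand(indices); base[i] via getD (indices are in range)
def pvExpandB (base : List String) : List Nat → List (List String)
  | [] => [base]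
  | i :: rest =>
    (pvAminoB.filter (fun aa => aa ≠ base.getD i "")).flatMap
      (fun aa => (pvExpandB base rest).map (fun tail => tail.set i aa))

def protein_neighbor_generator_alt (config : List String) (config_dict : List (String × Int)) (n_edit : Int) : List (List String) :=
  (pvCombosB config.length n_edit.toNat 0).flatMap (pvExpandB config)

-- ===== PRECONDITION & SPEC =====
-- Pre_ excludes exactly n_edit < 0, where A raises ValueError (combinations with negative r).
def Pre_protein_neighbor_generator (config : List String) (config_dict : List (String × Int)) (n_edit : Int) : Prop := 0 ≤ n_edit
instance (config : List String) (config_dict : List (String × Int)) (n_edit : Int) : Decidable (Pre_protein_neighbor_generator config config_dict n_edit) := by unfold Pre_protein_neighbor_generator; infer_instance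
def pvWitness_protein_neighbor_generator : List String × (List (String × Int)) × Int := (["A", "C"], [], 1)

def Spec_protein_neighbor_generator (config : List String) (config_dict : List (String × Int)) (n_edit : Int) (out : List (List String)) : Prop := out = protein_neighbor_generator_alt config config_dict n_edit
instance (config : List String) (config_dict : List (String × Int)) (n_edit : Int) (out : List (List String)) : Decidable (Spec_protein_neighbor_generator config config_dict n_edit out) := by unfold Spec_protein_neighbor_generator; infer_instance

-- ===== CLAIM (what is proved, stated in full; the proofs are below) =====
def Claim_equal_protein_neighbor_generator : Prop := ∀ (config : List String) (config_dict : List (String × Int)) (n_edit : Int), Dom_protein_neighbor_generator config config_dict n_edit → Pre_protein_neighbor_generator config config_dict n_edit → Spec_protein_neighbor_generator config config_dict n_edit (protein_neighbor_generator config config_dict n_edit)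

-- ===== LEMMAS AND PROOFS =====

theorem pvFlatMap_congr {α β : Type} {l : List α} {f g : α → List β}
    (h : ∀ x ∈ l, f x = g x) : l.flatMap f = l.flatMap g := by
  induction l with
  | nil => rfl
  | cons x xs ih =>
    simp only [List.flatMap_cons]
    rw [h x (by simp), ih (fun y hy => h y (by simp [hy]))]

-- combinations agree: pvCombsA over range' s m = pvCombosB n k s when s + m = n
theorem pvCombosB_nil (n k s : Nat) (h : n ≤ k + s) : pvCombosB n (k + 1) s = [] := by
  have h0 : n - k - s = 0 := by omega
  rw [pvCombosB, h0]
  rfl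

theorem pvCombs_eq (n : Nat) : ∀ m s k, s + m = n →
    pvCombsA (List.range' s m) k = pvCombosB n k s := by
  intro m
  induction m with
  | zero =>
    intro s k hs
    cases k with
    | zero => simp [pvCombsA, pvCombosB]
    | succ k =>
      have : n - k - s = 0 := by omega
      simp [pvCombsA, pvCombosB, this]
  | succ m ih =>
    intro s k hs
    cases k with
    | zero => simp [pvCombsA, pvCombosB]
    | succ k =>
      rw [List.range'_succ]
      show ((pvCombsA (List.range' (s+1) m) k).map (s :: ·)) ++
             pvCombsA (List.range' (s+1) m) (k+1) = _
      rw [ih (s+1) k (by omega), ih (s+1) (k+1) (by omega)]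
      by_cases hk : k ≤ m
      · conv_rhs => rw [pvCombosB]
        rw [show n - k - s = (m - k) + 1 from by omega, List.range'_succ,
          List.flatMap_cons]
        rw [pvCombosB]
        rw [show n - k - (s + 1) = m - k from by omega]
      · cases k with
        | zero => exact absurd (by omega : (0:Nat) ≤ m) hk
        | succ j =>
          rw [pvCombosB_nil n j (s+1) (by omega), pvCombosB_nil n (j+1) (s+1) (by omega),
            pvCombosB_nil n (j+1) s (by omega)]
          simp

theorem pvCombsA_sublist : ∀ (l : List Nat) (k : Nat) (out : List Nat),
    out ∈ pvCombsA l k → out.Sublist l := by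
  intro l
  induction l with
  | nil =>
    intro k out h
    cases k with
    | zero => simp [pvCombsA] at h; simp [h]
    | succ k => simp [pvCombsA] at h
  | cons x xs ih =>
    intro k out h
    cases k with
    | zero => simp [pvCombsA] at h; simp [h]
    | succ k =>
      rw [pvCombsA, List.mem_append] at h
      rcases h with h | h
      · rcases List.mem_map.mp h with ⟨t, ht, rfl⟩
        exact List.Sublist.cons₂ x (ih k t ht)
      · exact List.Sublist.cons x (ih (k+1) out h)

-- setting at an index not touched later commutes with the remaining assignments
theorem pvApplyA_set (c : List String) (i : Nat) (x : String) :
    ∀ (zs : List (Nat × String)), (∀ p ∈ zs, p.1 ≠ i) →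
    pvApplyA (c.set i x) zs = (pvApplyA c zs).set i x := by
  intro zs
  induction zs generalizing c with
  | nil => intro _; rfl
  | cons p ps ih =>
    intro h
    show pvApplyA ((c.set i x).set p.1 p.2) ps = (pvApplyA (c.set p.1 p.2) ps).set i x
    rw [List.set_comm x p.2 (Ne.symm (h p (by simp))),
      ih _ (fun q hq => h q (by simp [hq]))]

-- per index-set: A's product + assignment loop equals B's recursive expansion
theorem pvExpand_eq (config : List String) :
    ∀ (indices : List Nat), indices.Pairwise (· < ·) →
    (pvProdA (indices.map (fun i => pvAminoA.filter (fun aa => aa ≠ config.getD i "")))).map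
        (fun changes => pvApplyA config (indices.zip changes)) =
      pvExpandB config indices := by
  intro indices
  induction indices with
  | nil => intro _; rfl
  | cons i rest ih =>
    intro hp
    have hlt : ∀ j ∈ rest, i < j := fun j hj => (List.pairwise_cons.mp hp).1 j hj
    have hrest := ih (List.pairwise_cons.mp hp).2
    rw [List.map_cons, pvProdA, List.map_flatMap, pvExpandB]
    refine pvFlatMap_congr ?_
    intro x hx
    rw [List.map_map, ← hrest, List.map_map]
    refine List.map_congr_left fun changes _ => ?_
    show pvApplyA config ((i, x) :: rest.zip changes) = (pvApplyA config (rest.zip changes)).set i x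
    show pvApplyA (config.set i x) (rest.zip changes) = _
    refine pvApplyA_set config i x _ ?_
    intro p hp'
    have hpm : p.1 ∈ rest := (List.of_mem_zip hp').1
    exact Ne.symm (Nat.ne_of_lt (hlt p.1 hpm))

-- ===== VERDICT (by name: the statement is the Claim_ definition above) =====
theorem protein_neighbor_generator_spec : Claim_equal_protein_neighbor_generator := by
  intro config config_dict n_edit _ _
  unfold Spec_protein_neighbor_generator protein_neighbor_generator protein_neighbor_generator_alt
  have hc : pvCombsA (List.range config.length) n_edit.toNat =
      pvCombosB config.length n_edit.toNat 0 := by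
    rw [List.range_eq_range']
    exact pvCombs_eq config.length config.length 0 n_edit.toNat (by omega)
  rw [← hc]
  refine pvFlatMap_congr ?_
  intro indices hmem
  have hsub : indices.Sublist (List.range config.length) := pvCombsA_sublist _ _ _ hmem
  have hpw : indices.Pairwise (· < ·) := List.Pairwise.sublist hsub List.pairwise_lt_range
  exact pvExpand_eq config indices hpw
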